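-- pv_equiv track=rewrite | github.com/posl/comment_recommendation | script/mod_gen/2_time/zh/262_D/6.py | count_min_max
-- ===== SOURCE A (Python) =====
-- def count_min_max(a):
--     n = len(a)
--     count = 0
--     for i in range(n):
--         for j in range(i+1,n):
--             if min(a[i],a[j]) == i+1 and max(a[i],a[j]) == j+1:
--                 count += 1
--     return count
-- ===== SOURCE B (Python) =====
-- def count_min_max(a):
--     # One pass: a pair (i,j), i<j, matches iff {a[i],a[j]} == {i+1,j+1},
--     # i.e. both are fixed points (a[k]==k+1) or they form a swap (a[i]==j+1, a[j]==i+1).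
--     n = len(a)
--     count = 0
--     fixed_seen = 0
--     for i, v in enumerate(a):
--         if v == i + 1:
--             count += fixed_seen
--             fixed_seen += 1
--         elif i + 1 < v <= n and a[v - 1] == i + 1:
--             count += 1
--     return count
-- ===== Notes on version B (the rewrite author's own statement) =====
-- stated objective: faster
-- what changed: Replaced the O(n^2) scan over all index pairs by a single O(n) pass: a pair (i,j) matches iff both are fixed points (a[k]==k+1), counted incrementally with a running fixed-point counter, or they form a swap (a[i]==j+1, a[j]==i+1), found by one direct index lookup a[a[i]-1].
import Mathlib
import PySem

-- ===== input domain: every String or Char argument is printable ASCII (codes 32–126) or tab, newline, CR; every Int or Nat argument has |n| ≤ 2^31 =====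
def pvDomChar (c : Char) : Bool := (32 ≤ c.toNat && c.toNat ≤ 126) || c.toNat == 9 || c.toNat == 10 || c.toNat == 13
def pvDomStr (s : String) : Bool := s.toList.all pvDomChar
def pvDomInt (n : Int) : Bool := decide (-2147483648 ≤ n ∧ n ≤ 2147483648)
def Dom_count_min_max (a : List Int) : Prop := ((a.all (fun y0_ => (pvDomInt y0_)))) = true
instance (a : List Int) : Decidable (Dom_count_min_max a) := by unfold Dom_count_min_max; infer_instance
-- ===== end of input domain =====

-- B replaces A's O(n^2) double loop by one O(n) pass: a pair matches iff both indices are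
-- fixed points (a[k]=k+1), counted incrementally, or they form a swap, found by direct lookup.

-- ===== PORT A =====
def count_min_max (a : List Int) : Int :=
  let n : Int := a.length
  (PySem.List.pyRange 0 n 1).foldl (fun count i =>
    (PySem.List.pyRange (i + 1) n 1).foldl (fun count j =>
      if min (PySem.List.pyGetD a i 0) (PySem.List.pyGetD a j 0) = i + 1 ∧
         max (PySem.List.pyGetD a i 0) (PySem.List.pyGetD a j 0) = j + 1
      then count + 1 else count) count) 0

-- ===== PORT B =====
def count_min_max_alt (a : List Int) : Int :=
  let n : Int := a.length
  let r := (PySem.List.enumerate a 0).foldl (fun (st : Int × Int) iv =>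
      if iv.2 = iv.1 + 1 then (st.1 + st.2, st.2 + 1)
      else if iv.1 + 1 < iv.2 ∧ iv.2 ≤ n ∧ PySem.List.pyGetD a (iv.2 - 1) 0 = iv.1 + 1
      then (st.1 + 1, st.2)
      else st) (0, 0)
  r.1

-- ===== PRECONDITION & SPEC =====
def Spec_count_min_max (a : List Int) (out : Int) : Prop := out = count_min_max_alt a
instance (a : List Int) (out : Int) : Decidable (Spec_count_min_max a out) := by unfold Spec_count_min_max; infer_instance

-- ===== CLAIM (what is proved, stated in full; the proofs are below) =====
def Claim_equal_count_min_max : Prop := ∀ (a : List Int), Dom_count_min_max a → Spec_count_min_max a (count_min_max a)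

-- ===== LEMMAS AND PROOFS =====

-- a[i] (in range wherever it is read below)
def pvG (a : List Int) (i : Int) : Int := PySem.List.pyGetD a i 0

-- number of fixed points a[i] = i+1 at indices < m
def pvCnt (a : List Int) (m : Int) : Int :=
  ((PySem.List.pyRange 0 m 1).map (fun i => if pvG a i = i + 1 then (1:Int) else 0)).sum

-- contribution of index j in B's single pass
def pvContrib (a : List Int) (j : Int) : Int :=
  if pvG a j = j + 1 then pvCnt a j
  else if j + 1 < pvG a j ∧ pvG a j ≤ (a.length : Int) ∧ pvG a (pvG a j - 1) = j + 1 then 1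
  else 0

-- tail sum of contributions from index m on
def pvTS (a : List Int) (m : Int) : Int :=
  ((PySem.List.pyRange m (a.length : Int) 1).map (pvContrib a)).sum

-- fold an "add f x" accumulator = initial + sum  (instance of PySem.List.foldl_add after rewriting the if)
theorem pv_foldl_if (l : List Int) (p : Int → Prop) [DecidablePred p] (c : Int) :
    l.foldl (fun c j => if p j then c + 1 else c) c
      = c + (l.map (fun j => if p j then (1:Int) else 0)).sum := by
  have h : (fun (c j : Int) => if p j then c + 1 else c)
      = (fun (c j : Int) => c + (if p j then (1:Int) else 0)) := by
    funext c j; split_ifs <;> ring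
  rw [h, PySem.List.foldl_add]

-- pointwise split of the pair condition, for i < j
theorem pv_split (x y i j : Int) (hij : i < j) :
    (if min x y = i + 1 ∧ max x y = j + 1 then (1:Int) else 0)
      = (if x = i + 1 ∧ y = j + 1 then (1:Int) else 0)
        + (if x = j + 1 ∧ y = i + 1 then (1:Int) else 0) := by
  rcases le_total x y with h | h <;>
    simp only [min_def, max_def] <;> split_ifs <;> omega

-- sum over pairs i<j<n equals the same sum grouped by the larger index
theorem pv_reindex (h : Int → Int → Int) (n : Nat) :
    ((PySem.List.pyRange 0 (n:Int) 1).map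
        (fun i => ((PySem.List.pyRange (i+1) (n:Int) 1).map (h i)).sum)).sum
      = ((PySem.List.pyRange 0 (n:Int) 1).map
        (fun j => ((PySem.List.pyRange 0 j 1).map (fun i => h i j)).sum)).sum := by
  induction n with
  | zero => simp [PySem.List.pyRange_one_eq_nil]
  | succ n ih =>
    have hc : ((n + 1 : Nat) : Int) = (n : Int) + 1 := by push_cast; ring
    rw [hc, PySem.List.pyRange_one_succ_right (by positivity),
        List.map_append, List.sum_append, List.map_append, List.sum_append]
    simp only [List.map_cons, List.map_nil, List.sum_cons, List.sum_nil]
    rw [PySem.List.pyRange_one_eq_nil (le_refl ((n:Int)+1))]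
    have hin : ∀ i ∈ PySem.List.pyRange 0 (n:Int) 1,
        ((PySem.List.pyRange (i+1) ((n:Int)+1) 1).map (h i)).sum
          = ((PySem.List.pyRange (i+1) (n:Int) 1).map (h i)).sum + h i (n:Int) := by
      intro i hi
      have hlt : i < (n:Int) := (PySem.List.mem_pyRange_one.mp hi).2
      rw [PySem.List.pyRange_one_succ_right (by omega), List.map_append, List.sum_append]
      simp
    rw [List.map_congr_left hin, PySem.List.sum_map_add_int, ih]
    simp

-- the inner swap sum collapses to a single indicator
theorem pv_collapse (b c : Int) (Q : Int → Prop) [DecidablePred Q] :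
    ∀ (a : Int),
    ((PySem.List.pyRange a b 1).map (fun j => if c = j + 1 ∧ Q j then (1:Int) else 0)).sum
      = if a ≤ c - 1 ∧ c - 1 < b ∧ Q (c - 1) then 1 else 0 := by
  have key : ∀ (k : Nat) (a : Int), (b - a).toNat = k →
      ((PySem.List.pyRange a b 1).map (fun j => if c = j + 1 ∧ Q j then (1:Int) else 0)).sum
        = if a ≤ c - 1 ∧ c - 1 < b ∧ Q (c - 1) then 1 else 0 := by
    intro k
    induction k with
    | zero =>
      intro a hk
      have hab : b ≤ a := by omega
      rw [PySem.List.pyRange_one_eq_nil hab]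
      simp only [List.map_nil, List.sum_nil]
      split_ifs with h
      · exfalso; omega
      · rfl
    | succ k ih =>
      intro a hk
      have hab : a < b := by omega
      rw [PySem.List.pyRange_one_cons hab]
      simp only [List.map_cons, List.sum_cons]
      rw [ih (a + 1) (by omega)]
      by_cases hc : c = a + 1
      · subst hc
        have e : a + 1 - 1 = a := by ring
        rw [e]
        by_cases hq : Q a
        · rw [if_pos ⟨rfl, hq⟩, if_neg (by omega), if_pos ⟨le_refl a, hab, hq⟩]
          norm_num
        · rw [if_neg (by tauto), if_neg (by tauto), if_neg (by tauto)]
          norm_num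
      · rw [if_neg (by tauto)]
        have hiff : (a + 1 ≤ c - 1 ∧ c - 1 < b ∧ Q (c - 1)) ↔
            (a ≤ c - 1 ∧ c - 1 < b ∧ Q (c - 1)) := by
          constructor <;> rintro ⟨h1, h2, h3⟩ <;> exact ⟨by omega, h2, h3⟩
        rw [if_congr hiff rfl rfl, zero_add]
  intro a; exact key (b - a).toNat a rfl

-- A in summation normal form
theorem pv_A_eq (a : List Int) :
    count_min_max a
      = ((PySem.List.pyRange 0 (a.length : Int) 1).map
          (fun i => ((PySem.List.pyRange (i+1) (a.length : Int) 1).map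
            (fun j => if min (pvG a i) (pvG a j) = i + 1 ∧ max (pvG a i) (pvG a j) = j + 1
                      then (1:Int) else 0)).sum)).sum := by
  simp only [count_min_max, pvG]
  rw [show (fun (count i : Int) =>
        List.foldl (fun count j =>
          if min (PySem.List.pyGetD a i 0) (PySem.List.pyGetD a j 0) = i + 1 ∧
             max (PySem.List.pyGetD a i 0) (PySem.List.pyGetD a j 0) = j + 1
          then count + 1 else count) count (PySem.List.pyRange (i + 1) (a.length : Int) 1))
      = (fun (count i : Int) => count +
          ((PySem.List.pyRange (i + 1) (a.length : Int) 1).map (fun j =>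
            if min (PySem.List.pyGetD a i 0) (PySem.List.pyGetD a j 0) = i + 1 ∧
               max (PySem.List.pyGetD a i 0) (PySem.List.pyGetD a j 0) = j + 1
            then (1:Int) else 0)).sum)
      from funext fun c => funext fun i => pv_foldl_if _ _ c]
  rw [PySem.List.foldl_add, zero_add]
  rfl

-- A equals the single-pass total
theorem pv_A_TS (a : List Int) : count_min_max a = pvTS a 0 := by
  rw [pv_A_eq]
  -- split each inner summand into the fixed-fixed part and the swap part
  have hsplit : ∀ i ∈ PySem.List.pyRange 0 (a.length : Int) 1,
      ((PySem.List.pyRange (i+1) (a.length : Int) 1).map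
        (fun j => if min (pvG a i) (pvG a j) = i + 1 ∧ max (pvG a i) (pvG a j) = j + 1
                  then (1:Int) else 0)).sum
      = ((PySem.List.pyRange (i+1) (a.length : Int) 1).map
          (fun j => if pvG a i = i + 1 ∧ pvG a j = j + 1 then (1:Int) else 0)).sum
        + ((PySem.List.pyRange (i+1) (a.length : Int) 1).map
          (fun j => if pvG a i = j + 1 ∧ pvG a j = i + 1 then (1:Int) else 0)).sum := by
    intro i _
    rw [← PySem.List.sum_map_add_int]
    refine congrArg _ (List.map_congr_left ?_)
    intro j hj
    have hij : i < j := by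
      have := (PySem.List.mem_pyRange_one.mp hj).1; omega
    exact pv_split _ _ _ _ hij
  rw [List.map_congr_left hsplit, PySem.List.sum_map_add_int]
  -- fixed-fixed part: regroup by the larger index, then collapse to the running count
  have hfix : ((PySem.List.pyRange 0 (a.length : Int) 1).map
      (fun i => ((PySem.List.pyRange (i+1) (a.length : Int) 1).map
        (fun j => if pvG a i = i + 1 ∧ pvG a j = j + 1 then (1:Int) else 0)).sum)).sum
      = ((PySem.List.pyRange 0 (a.length : Int) 1).map
        (fun j => if pvG a j = j + 1 then pvCnt a j else 0)).sum := by
    rw [pv_reindex (fun i j => if pvG a i = i + 1 ∧ pvG a j = j + 1 then (1:Int) else 0) a.length]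
    refine congrArg _ (List.map_congr_left ?_)
    intro j _
    by_cases hf : pvG a j = j + 1
    · simp only [hf, and_true, if_pos]
      rw [pvCnt]
    · rw [if_neg hf]
      have : ∀ i ∈ PySem.List.pyRange 0 j 1,
          (if pvG a i = i + 1 ∧ pvG a j = j + 1 then (1:Int) else 0) = 0 := by
        intro i _; rw [if_neg (by tauto)]
      rw [List.map_congr_left this]
      simp
  -- swap part: the inner sum has at most one nonzero term, at j = a[i] - 1
  have hswap : ∀ i ∈ PySem.List.pyRange 0 (a.length : Int) 1,
      ((PySem.List.pyRange (i+1) (a.length : Int) 1).map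
        (fun j => if pvG a i = j + 1 ∧ pvG a j = i + 1 then (1:Int) else 0)).sum
      = (if i + 1 < pvG a i ∧ pvG a i ≤ (a.length : Int) ∧ pvG a (pvG a i - 1) = i + 1
         then (1:Int) else 0) := by
    intro i _
    rw [pv_collapse (a.length : Int) (pvG a i) (fun j => pvG a j = i + 1) (i+1)]
    refine if_congr ?_ rfl rfl
    constructor
    · rintro ⟨h1, h2, h3⟩; exact ⟨by omega, by omega, h3⟩
    · rintro ⟨h1, h2, h3⟩; exact ⟨by omega, by omega, h3⟩
  rw [hfix, List.map_congr_left hswap, ← PySem.List.sum_map_add_int, pvTS]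
  refine congrArg _ (List.map_congr_left ?_)
  intro j _
  rw [pvContrib]
  by_cases hf : pvG a j = j + 1
  · rw [if_pos hf, if_pos hf, if_neg (by omega)]
    ring
  · rw [if_neg hf, if_neg hf, zero_add]

-- B's fold invariant
theorem pv_B_inv (a : List Int) :
    ∀ (xs : List Int) (m : Nat), m ≤ a.length → xs = a.drop m → ∀ c : Int,
    (PySem.List.enumerate xs (m:Int)).foldl (fun (st : Int × Int) iv =>
        if iv.2 = iv.1 + 1 then (st.1 + st.2, st.2 + 1)
        else if iv.1 + 1 < iv.2 ∧ iv.2 ≤ (a.length : Int) ∧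
             PySem.List.pyGetD a (iv.2 - 1) 0 = iv.1 + 1
        then (st.1 + 1, st.2)
        else st) (c, pvCnt a m)
      = (c + pvTS a m, pvCnt a (a.length : Int)) := by
  intro xs
  induction xs with
  | nil =>
    intro m hm hdrop c
    have hlen : a.length ≤ m := by
      by_contra h
      have := List.drop_eq_getElem_cons (l := a) (by omega : m < a.length)
      rw [this] at hdrop; exact List.cons_ne_nil _ _ hdrop.symm
    have hma : m = a.length := by omega
    subst hma
    simp [PySem.List.enumerate, pvTS, PySem.List.pyRange_one_eq_nil]
  | cons x xs' ih =>
    intro m hm hdrop c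
    have hlt : m < a.length := by
      by_contra h
      rw [List.drop_eq_nil_of_le (by omega)] at hdrop
      exact List.cons_ne_nil _ _ hdrop
    rw [List.drop_eq_getElem_cons hlt] at hdrop
    have hx : x = a[m] := (List.cons.injEq _ _ _ _ ▸ hdrop).1
    have hxs' : xs' = a.drop (m+1) := (List.cons.injEq _ _ _ _ ▸ hdrop).2
    have hgm : pvG a (m:Int) = x := by
      rw [pvG, PySem.List.pyGetD_natCast, List.getD_eq_getElem a 0 hlt, hx]
    have hcnt : pvCnt a ((m:Int) + 1)
        = pvCnt a (m:Int) + (if pvG a (m:Int) = (m:Int) + 1 then (1:Int) else 0) := by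
      rw [pvCnt, pvCnt, PySem.List.pyRange_one_succ_right (by positivity),
          List.map_append, List.sum_append]
      simp
    have hTS : pvTS a (m:Int) = pvContrib a (m:Int) + pvTS a ((m:Int) + 1) := by
      rw [pvTS, pvTS, PySem.List.pyRange_one_cons (by exact_mod_cast hlt),
          List.map_cons, List.sum_cons]
    rw [PySem.List.enumerate_cons, List.foldl_cons]
    have hstep : (if x = (m:Int) + 1 then (c + pvCnt a (m:Int), pvCnt a (m:Int) + 1)
        else if (m:Int) + 1 < x ∧ x ≤ (a.length : Int) ∧
             PySem.List.pyGetD a (x - 1) 0 = (m:Int) + 1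
        then (c + 1, pvCnt a (m:Int))
        else (c, pvCnt a (m:Int)))
        = (c + pvContrib a (m:Int), pvCnt a ((m:Int) + 1)) := by
      rw [pvContrib, hgm, hcnt, hgm]
      simp only [pvG]
      by_cases h1 : x = (m:Int) + 1
      · rw [if_pos h1, if_pos h1, if_pos h1]
      · rw [if_neg h1, if_neg h1, if_neg h1, add_zero]
        by_cases h2 : (m:Int) + 1 < x ∧ x ≤ (a.length : Int) ∧
            PySem.List.pyGetD a (x - 1) 0 = (m:Int) + 1
        · rw [if_pos h2, if_pos h2]
        · rw [if_neg h2, if_neg h2, add_zero]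
    dsimp only
    rw [hstep]
    have hc1 : (m:Int) + 1 = ((m+1 : Nat) : Int) := by push_cast; ring
    rw [hc1, ih (m+1) (by omega) hxs' (c + pvContrib a (m:Int))]
    rw [Prod.mk.injEq]
    constructor
    · rw [hTS, hc1]; ring
    · rfl

theorem pv_B_TS (a : List Int) : count_min_max_alt a = pvTS a 0 := by
  simp only [count_min_max_alt]
  have h0 : pvCnt a 0 = 0 := by simp [pvCnt, PySem.List.pyRange_one_eq_nil]
  have h := pv_B_inv a a 0 (by omega) (by simp) 0
  rw [show ((0:Nat):Int) = (0:Int) by simp] at h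
  rw [h0] at h
  rw [h]
  simp

-- ===== VERDICT (by name: the statement is the Claim_ definition above) =====
theorem count_min_max_spec : Claim_equal_count_min_max := by
  intro a _
  unfold Spec_count_min_max
  rw [pv_A_TS, pv_B_TS]
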